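-- pv_equiv track=rewrite | github.com/patidar12/Programs | cdnjs/AdvanceGraph02/Dominos04.py | minNumOfDominos
-- ===== SOURCE A (Python) =====
-- from collections import deque
--
-- def dfs(edges, src, stack, visited):
--     visited[src] = True
--     for ele in edges[src]:
--         if not visited[ele]:
--             dfs(edges, ele, stack, visited)
--     stack.append(src)
--
-- def dfs2(edges, src, visited):
--     visited[src] = True
--     for ele in edges[src]:
--         if not visited[ele]:
--             dfs2(edges, ele, visited)
--
-- def minNumOfDominos(edges, V):
--     visited = [False for _ in range(V)]
--     stack = deque()
--     for i in range(V):
--         if not visited[i]: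
--             dfs(edges, i, stack, visited)
--
--     visited = [False for _ in range(V)]
--     count = 0
--     while stack:
--         ele = stack.pop()
--         if not visited[ele]:
--             count += 1
--             dfs2(edges, ele, visited)
--     return count
-- ===== SOURCE B (Python) =====
-- def minNumOfDominos(edges, V):
--     visited = [False for _ in range(V)]
--     order = []
--     for i in range(V):
--         if not visited[i]:
--             visited[i] = True
--             frames = [(i, iter(edges[i]))]
--             while frames:
--                 src, it = frames[-1]
--                 nxt = next(it, None)
--                 if nxt is None:
--                     order.append(src)
--                     frames.pop()
--                 elif not visited[nxt]:
--                     visited[nxt] = True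
--                     frames.append((nxt, iter(edges[nxt])))
--     visited = [False for _ in range(V)]
--     count = 0
--     for ele in reversed(order):
--         if not visited[ele]:
--             count += 1
--             visited[ele] = True
--             frames = [iter(edges[ele])]
--             while frames:
--                 nxt = next(frames[-1], None)
--                 if nxt is None:
--                     frames.pop()
--                 elif not visited[nxt]:
--                     visited[nxt] = True
--                     frames.append(iter(edges[nxt]))
--     return count
-- ===== Notes on version B (the rewrite author's own statement) =====
-- stated objective: alternative
-- what changed: Both recursive DFS helpers are replaced by explicit-stack iterative traversals (a stack of (node, neighbour-iterator) frames) that produce the identical post-order finish stack and root count, so no RecursionError on deep graphs.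
-- outside the precondition, e.g. on minNumOfDominos([[0], [5]], 1): A returns 1, B returns 1
import Mathlib
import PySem

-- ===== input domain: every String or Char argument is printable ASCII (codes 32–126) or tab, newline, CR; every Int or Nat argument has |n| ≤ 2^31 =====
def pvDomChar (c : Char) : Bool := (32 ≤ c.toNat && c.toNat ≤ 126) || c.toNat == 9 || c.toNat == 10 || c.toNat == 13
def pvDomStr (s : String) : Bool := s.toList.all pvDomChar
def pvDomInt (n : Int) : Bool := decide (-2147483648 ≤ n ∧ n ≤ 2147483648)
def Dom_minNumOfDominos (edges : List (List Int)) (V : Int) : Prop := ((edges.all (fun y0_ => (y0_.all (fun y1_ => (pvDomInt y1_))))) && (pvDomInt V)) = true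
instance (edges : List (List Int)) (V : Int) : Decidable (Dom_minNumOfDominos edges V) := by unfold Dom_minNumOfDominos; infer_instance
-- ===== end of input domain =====

-- B replaces the two recursive DFS helpers by explicit-stack iterative traversals (a stack of
-- (node, remaining-neighbours) frames) producing the same finish order; objective: alternative.

-- Shared Python-array helpers (Python index semantics, incl. negative wrap; the defaults are
-- only taken where Python would raise IndexError, which Pre_ excludes).
def vget (v : List Bool) (i : Int) : Bool := PySem.List.pyGetD v i true
def vset (v : List Bool) (i : Int) : List Bool := PySem.List.pySetD v i true
def nbrs (edges : List (List Int)) (i : Int) : List Int := PySem.List.pyGetD edges i []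
-- number of still-unvisited entries; the termination measure of B's machines
def unvis (v : List Bool) : Nat := v.countP (fun b => !b)

-- facts needed by runB/run2B for termination (cited in their decreasing_by)
lemma countP_set_true_lt : ∀ (v : List Bool) (j : Nat), v[j]? = some false →
    (v.set j true).countP (fun b => !b) < v.countP (fun b => !b) := by
  intro v
  induction v with
  | nil => intro j h; simp at h
  | cons b t ih =>
    intro j h
    cases j with
    | zero => simp_all
    | succ j =>
      simp only [List.getElem?_cons_succ] at h
      have := ih j h
      simp only [List.set_cons_succ, List.countP_cons]
      omega

lemma pyresolve (v : List Bool) (i : Int) (b : Bool) (h : PySem.List.pyGet? v i = some b) :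
    ∃ j : Nat, v[j]? = some b ∧ PySem.List.pySetD v i true = v.set j true := by
  simp only [PySem.List.pyGet?, PySem.List.pyIdx?] at h
  simp only [PySem.List.pySetD, PySem.List.pySet?, PySem.List.pyIdx?]
  split_ifs at h ⊢
  · exact ⟨i.toNat, by simpa using h, rfl⟩
  · simp at h
  · exact ⟨v.length - (-i).toNat, by simpa using h, rfl⟩
  · simp at h

lemma unvis_vset_lt (v : List Bool) (i : Int) (h : vget v i = false) :
    unvis (vset v i) < unvis v := by
  unfold vget PySem.List.pyGetD at h
  rcases hg : PySem.List.pyGet? v i with _ | b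
  · simp [hg] at h
  · have hb : b = false := by simp [hg] at h; exact h
    subst hb
    obtain ⟨j, hj, hs⟩ := pyresolve v i false hg
    unfold vset unvis
    rw [hs]
    exact countP_set_true_lt v j hj

-- ===== PORT A =====
-- recursive dfs/dfs2, with a fuel argument as the totality device only: the ports are run with
-- fuel V.toNat + 1, which the proofs show is never exhausted (call depth ≤ number of unvisited nodes)
def dfsA (edges : List (List Int)) : Nat → Int → List Int × List Bool → List Int × List Bool
  | 0, _, st => st
  | f + 1, src, st =>
    let st1 := (nbrs edges src).foldl
      (fun st e => if vget st.2 e then st else dfsA edges f e st) (st.1, vset st.2 src)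
    (st1.1 ++ [src], st1.2)

def dfs2A (edges : List (List Int)) : Nat → Int → List Bool → List Bool
  | 0, _, v => v
  | f + 1, src, v =>
    (nbrs edges src).foldl (fun v e => if vget v e then v else dfs2A edges f e v) (vset v src)

-- the `while stack: ele = stack.pop()` loop, as structural recursion over stack.reverse
-- (popping from the right end of the deque = traversing the reversed list)
def pass2A (edges : List (List Int)) (fuel : Nat) : List Int → Int → List Bool → Int
  | [], c, _ => c
  | e :: rest, c, v =>
    if vget v e then pass2A edges fuel rest c v
    else pass2A edges fuel rest (c + 1) (dfs2A edges fuel e v)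

def minNumOfDominos (edges : List (List Int)) (V : Int) : Int :=
  (pass2A edges (V.toNat + 1)
    (((PySem.List.pyRange 0 V 1).foldl
        (fun (st : List Int × List Bool) i =>
          if vget st.2 i then st else dfsA edges (V.toNat + 1) i st)
        ([], List.replicate V.toNat false)).1.reverse)
    0 (List.replicate V.toNat false))

-- ===== PORT B =====
-- iterative DFS: a stack of (node, remaining-neighbour-list) frames (= B's (node, iterator) frames)
def sizeF (frames : List (Int × List Int)) : Nat := frames.foldr (fun p a => p.2.length + 1 + a) 0

def runB (edges : List (List Int)) : List (Int × List Int) → List Int → List Bool → List Int × List Bool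
  | [], order, v => (order, v)
  | (src, []) :: rest, order, v => runB edges rest (order ++ [src]) v
  | (src, e :: es) :: rest, order, v =>
    if h : vget v e then runB edges ((src, es) :: rest) order v
    else runB edges ((e, nbrs edges e) :: (src, es) :: rest) order (vset v e)
termination_by frames order v => (unvis v, sizeF frames)
decreasing_by
  · apply Prod.Lex.right; simp [sizeF]
  · apply Prod.Lex.right; simp [sizeF]
  · apply Prod.Lex.left; apply unvis_vset_lt; simp at h; exact h

def sizeG (frames : List (List Int)) : Nat := frames.foldr (fun l a => l.length + 1 + a) 0

def run2B (edges : List (List Int)) : List (List Int) → List Bool → List Bool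
  | [], v => v
  | [] :: rest, v => run2B edges rest v
  | (e :: es) :: rest, v =>
    if h : vget v e then run2B edges (es :: rest) v
    else run2B edges (nbrs edges e :: es :: rest) (vset v e)
termination_by frames v => (unvis v, sizeG frames)
decreasing_by
  · apply Prod.Lex.right; simp [sizeG]
  · apply Prod.Lex.right; simp [sizeG]
  · apply Prod.Lex.left; apply unvis_vset_lt; simp at h; exact h

def minNumOfDominos_alt (edges : List (List Int)) (V : Int) : Int :=
  (((((PySem.List.pyRange 0 V 1).foldl
      (fun (st : List Int × List Bool) i =>
        if vget st.2 i then st else runB edges [(i, nbrs edges i)] st.1 (vset st.2 i))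
      ([], List.replicate V.toNat false)).1.reverse).foldl
    (fun (cv : Int × List Bool) ele =>
      if vget cv.2 ele then cv
      else (cv.1 + 1, run2B edges [nbrs edges ele] (vset cv.2 ele)))
    (0, List.replicate V.toNat false)).1)

-- ===== PRECONDITION & SPEC =====
-- Pre_ = A returns without exception: for positive V, len(edges) must cover range(V) and every
-- neighbour entry must be a valid Python index into visited (length V); outside this A raises
-- IndexError. It over-approximates slightly: entries of rows A happens never to read (rows past
-- index V reached by no negative wrap, rows of unreached nodes) are also constrained, although A
-- returns without reading them — see the cites in claim.json.
def Pre_minNumOfDominos (edges : List (List Int)) (V : Int) : Prop :=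
  0 < V → ((V ≤ (edges.length : Int)) ∧ ∀ l ∈ edges, ∀ x ∈ l, -V ≤ x ∧ x < V)
instance (edges : List (List Int)) (V : Int) : Decidable (Pre_minNumOfDominos edges V) := by
  unfold Pre_minNumOfDominos; infer_instance

def pvWitness_minNumOfDominos : List (List Int) × Int := ([[1], [0], []], 3)

def Spec_minNumOfDominos (edges : List (List Int)) (V : Int) (out : Int) : Prop := out = minNumOfDominos_alt edges V
instance (edges : List (List Int)) (V : Int) (out : Int) : Decidable (Spec_minNumOfDominos edges V out) := by unfold Spec_minNumOfDominos; infer_instance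

-- ===== CLAIM (what is proved, stated in full; the proofs are below) =====
def Claim_equal_minNumOfDominos : Prop := ∀ (edges : List (List Int)) (V : Int), Dom_minNumOfDominos edges V → Pre_minNumOfDominos edges V → Spec_minNumOfDominos edges V (minNumOfDominos edges V)

-- ===== LEMMAS AND PROOFS =====

-- the neighbour loops of dfsA/dfs2A, named so the simulation can speak about them
def fold1 (edges : List (List Int)) (f : Nat) (ns : List Int) (st : List Int × List Bool) : List Int × List Bool :=
  ns.foldl (fun st e => if vget st.2 e then st else dfsA edges f e st) st

def fold2 (edges : List (List Int)) (f : Nat) (ns : List Int) (v : List Bool) : List Bool :=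
  ns.foldl (fun v e => if vget v e then v else dfs2A edges f e v) v

lemma dfsA_succ (edges : List (List Int)) (f : Nat) (src : Int) (st : List Int × List Bool) :
    dfsA edges (f + 1) src st =
      ((fold1 edges f (nbrs edges src) (st.1, vset st.2 src)).1 ++ [src],
       (fold1 edges f (nbrs edges src) (st.1, vset st.2 src)).2) := rfl

lemma dfs2A_succ (edges : List (List Int)) (f : Nat) (src : Int) (v : List Bool) :
    dfs2A edges (f + 1) src v = fold2 edges f (nbrs edges src) (vset v src) := rfl

lemma countP_set_true_le : ∀ (v : List Bool) (j : Nat),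
    (v.set j true).countP (fun b => !b) ≤ v.countP (fun b => !b) := by
  intro v
  induction v with
  | nil => intro j; simp
  | cons b t ih =>
    intro j
    cases j with
    | zero => cases b <;> simp
    | succ j => have := ih j; simp [List.countP_cons]; omega

lemma unvis_vset_le (v : List Bool) (i : Int) : unvis (vset v i) ≤ unvis v := by
  unfold vset unvis
  simp only [PySem.List.pySetD, PySem.List.pySet?, PySem.List.pyIdx?]
  split_ifs <;> simp <;> apply countP_set_true_le

lemma unvis_le_length (v : List Bool) : unvis v ≤ v.length := List.countP_le_length ..

lemma length_vset (v : List Bool) (i : Int) : (vset v i).length = v.length := by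
  unfold vset
  simp only [PySem.List.pySetD, PySem.List.pySet?, PySem.List.pyIdx?]
  split_ifs <;> simp

lemma length_dfsA (edges : List (List Int)) :
    ∀ (f : Nat), (∀ src st, ((dfsA edges f src st).2).length = st.2.length) ∧
      (∀ ns st, ((fold1 edges f ns st).2).length = st.2.length) := by
  intro f
  induction f with
  | zero =>
    constructor
    · intro src st; rfl
    · intro ns
      induction ns with
      | nil => intro st; rfl
      | cons e es ih =>
        intro st
        show ((fold1 edges 0 es (if vget st.2 e then st else dfsA edges 0 e st)).2).length = _
        split <;> simp [ih, dfsA]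
  | succ f ih =>
    have hfold : ∀ ns st, ((fold1 edges (f + 1) ns st).2).length = st.2.length := by
      intro ns
      induction ns with
      | nil => intro st; rfl
      | cons e es ihe =>
        intro st
        show ((fold1 edges (f + 1) es (if vget st.2 e then st else dfsA edges (f + 1) e st)).2).length = _
        split
        · exact ihe st
        · rw [ihe, dfsA_succ]; simp [ih.2, length_vset]
    refine ⟨?_, hfold⟩
    intro src st
    rw [dfsA_succ]; simp [ih.2, length_vset]

lemma length_dfs2A (edges : List (List Int)) :
    ∀ (f : Nat), (∀ src v, (dfs2A edges f src v).length = v.length) ∧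
      (∀ ns v, (fold2 edges f ns v).length = v.length) := by
  intro f
  induction f with
  | zero =>
    constructor
    · intro src v; rfl
    · intro ns
      induction ns with
      | nil => intro v; rfl
      | cons e es ih =>
        intro v
        show (fold2 edges 0 es (if vget v e then v else dfs2A edges 0 e v)).length = _
        split <;> simp [ih, dfs2A]
  | succ f ih =>
    have hfold : ∀ ns v, (fold2 edges (f + 1) ns v).length = v.length := by
      intro ns
      induction ns with
      | nil => intro v; rfl
      | cons e es ihe =>
        intro v
        show (fold2 edges (f + 1) es (if vget v e then v else dfs2A edges (f + 1) e v)).length = _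
        split
        · exact ihe v
        · rw [ihe, dfs2A_succ, ih.2, length_vset]
    refine ⟨?_, hfold⟩
    intro src v
    rw [dfs2A_succ, ih.2, length_vset]

lemma unvis_dfsA_le (edges : List (List Int)) :
    ∀ (f : Nat), (∀ src st, unvis ((dfsA edges f src st).2) ≤ unvis st.2) ∧
      (∀ ns st, unvis ((fold1 edges f ns st).2) ≤ unvis st.2) := by
  intro f
  induction f with
  | zero =>
    constructor
    · intro src st; exact le_refl _
    · intro ns
      induction ns with
      | nil => intro st; exact le_refl _
      | cons e es ih =>
        intro st
        show unvis ((fold1 edges 0 es (if vget st.2 e then st else dfsA edges 0 e st)).2) ≤ _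
        split
        · exact ih st
        · exact le_trans (ih _) (le_refl _)
  | succ f ih =>
    have hfold : ∀ ns st, unvis ((fold1 edges (f + 1) ns st).2) ≤ unvis st.2 := by
      intro ns
      induction ns with
      | nil => intro st; exact le_refl _
      | cons e es ihe =>
        intro st
        show unvis ((fold1 edges (f + 1) es (if vget st.2 e then st else dfsA edges (f + 1) e st)).2) ≤ _
        split
        · exact ihe st
        · refine le_trans (ihe _) ?_
          rw [dfsA_succ]
          exact le_trans (ih.2 _ _) (unvis_vset_le _ _)
    refine ⟨?_, hfold⟩
    intro src st
    rw [dfsA_succ]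
    exact le_trans (ih.2 _ _) (unvis_vset_le _ _)

lemma unvis_dfs2A_le (edges : List (List Int)) :
    ∀ (f : Nat), (∀ src v, unvis (dfs2A edges f src v) ≤ unvis v) ∧
      (∀ ns v, unvis (fold2 edges f ns v) ≤ unvis v) := by
  intro f
  induction f with
  | zero =>
    constructor
    · intro src v; exact le_refl _
    · intro ns
      induction ns with
      | nil => intro v; exact le_refl _
      | cons e es ih =>
        intro v
        show unvis (fold2 edges 0 es (if vget v e then v else dfs2A edges 0 e v)) ≤ _
        split
        · exact ih v
        · exact le_trans (ih _) (le_refl _)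
  | succ f ih =>
    have hfold : ∀ ns v, unvis (fold2 edges (f + 1) ns v) ≤ unvis v := by
      intro ns
      induction ns with
      | nil => intro v; exact le_refl _
      | cons e es ihe =>
        intro v
        show unvis (fold2 edges (f + 1) es (if vget v e then v else dfs2A edges (f + 1) e v)) ≤ _
        split
        · exact ihe v
        · refine le_trans (ihe _) ?_
          rw [dfs2A_succ]
          exact le_trans (ih.2 _ _) (unvis_vset_le _ _)
    refine ⟨?_, hfold⟩
    intro src v
    rw [dfs2A_succ]
    exact le_trans (ih.2 _ _) (unvis_vset_le _ _)

-- the machine, run on one frame (src, ns), computes exactly A's neighbour loop followed by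
-- the post-order append of src — the heart of the equivalence
lemma sim1 (edges : List (List Int)) :
    ∀ (k : Nat) (v : List Bool), unvis v = k →
    ∀ (ns : List Int) (src : Int) (rest : List (Int × List Int)) (order : List Int) (f : Nat),
      unvis v ≤ f →
      runB edges ((src, ns) :: rest) order v =
        runB edges rest ((fold1 edges f ns (order, v)).1 ++ [src]) (fold1 edges f ns (order, v)).2 := by
  intro k
  induction k using Nat.strong_induction_on with
  | _ k IH =>
  intro v hv ns
  induction ns with
  | nil =>
    intro src rest order f hf
    simp only [runB, fold1, List.foldl_nil]
  | cons e es ihns =>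
    intro src rest order f hf
    have hfold : fold1 edges f (e :: es) (order, v) =
        fold1 edges f es (if vget v e then (order, v) else dfsA edges f e (order, v)) := rfl
    by_cases hve : vget v e = true
    · rw [hfold, if_pos hve]
      rw [show runB edges ((src, e :: es) :: rest) order v =
            runB edges ((src, es) :: rest) order v from by rw [runB]; rw [dif_pos hve]]
      exact ihns src rest order f hf
    · have hvf : vget v e = false := by simpa using hve
      have hlt : unvis (vset v e) < unvis v := unvis_vset_lt v e hvf
      obtain ⟨f', rfl⟩ : ∃ f', f = f' + 1 := ⟨f - 1, by omega⟩
      rw [hfold, if_neg hve]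
      rw [show runB edges ((src, e :: es) :: rest) order v =
            runB edges ((e, nbrs edges e) :: (src, es) :: rest) order (vset v e) from by
          rw [runB]; rw [dif_neg hve]]
      have A1 := IH (unvis (vset v e)) (by omega) (vset v e) rfl
        (nbrs edges e) e ((src, es) :: rest) order f' (by omega)
      rw [A1]
      have h2 : unvis (fold1 edges f' (nbrs edges e) (order, vset v e)).2 ≤ unvis (vset v e) :=
        (unvis_dfsA_le edges f').2 _ _
      have A2 := IH (unvis (fold1 edges f' (nbrs edges e) (order, vset v e)).2) (by omega)
        (fold1 edges f' (nbrs edges e) (order, vset v e)).2 rfl es src rest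
        ((fold1 edges f' (nbrs edges e) (order, vset v e)).1 ++ [e]) (f' + 1) (by omega)
      rw [A2, dfsA_succ]

lemma sim2 (edges : List (List Int)) :
    ∀ (k : Nat) (v : List Bool), unvis v = k →
    ∀ (ns : List Int) (rest : List (List Int)) (f : Nat),
      unvis v ≤ f →
      run2B edges (ns :: rest) v = run2B edges rest (fold2 edges f ns v) := by
  intro k
  induction k using Nat.strong_induction_on with
  | _ k IH =>
  intro v hv ns
  induction ns with
  | nil =>
    intro rest f hf
    simp only [run2B, fold2, List.foldl_nil]
  | cons e es ihns =>
    intro rest f hf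
    have hfold : fold2 edges f (e :: es) v =
        fold2 edges f es (if vget v e then v else dfs2A edges f e v) := rfl
    by_cases hve : vget v e = true
    · rw [hfold, if_pos hve]
      rw [show run2B edges ((e :: es) :: rest) v = run2B edges (es :: rest) v from by
          rw [run2B]; rw [dif_pos hve]]
      exact ihns rest f hf
    · have hvf : vget v e = false := by simpa using hve
      have hlt : unvis (vset v e) < unvis v := unvis_vset_lt v e hvf
      obtain ⟨f', rfl⟩ : ∃ f', f = f' + 1 := ⟨f - 1, by omega⟩
      rw [hfold, if_neg hve]
      rw [show run2B edges ((e :: es) :: rest) v =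
            run2B edges (nbrs edges e :: es :: rest) (vset v e) from by
          rw [run2B]; rw [dif_neg hve]]
      have A1 := IH (unvis (vset v e)) (by omega) (vset v e) rfl
        (nbrs edges e) (es :: rest) f' (by omega)
      rw [A1]
      have h2 : unvis (fold2 edges f' (nbrs edges e) (vset v e)) ≤ unvis (vset v e) :=
        (unvis_dfs2A_le edges f').2 _ _
      have A2 := IH (unvis (fold2 edges f' (nbrs edges e) (vset v e))) (by omega)
        (fold2 edges f' (nbrs edges e) (vset v e)) rfl es rest (f' + 1) (by omega)
      rw [A2, dfs2A_succ]

lemma loop1 (edges : List (List Int)) (F : Nat) :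
    ∀ (roots : List Int) (st : List Int × List Bool), st.2.length ≤ F →
      roots.foldl (fun st i => if vget st.2 i then st else dfsA edges (F + 1) i st) st =
      roots.foldl (fun st i => if vget st.2 i then st else runB edges [(i, nbrs edges i)] st.1 (vset st.2 i)) st := by
  intro roots
  induction roots with
  | nil => intro st hl; rfl
  | cons i rs ih =>
    intro st hl
    simp only [List.foldl_cons]
    by_cases hvi : vget st.2 i = true
    · rw [if_pos hvi, if_pos hvi]
      exact ih st hl
    · rw [if_neg hvi, if_neg hvi]
      have hun : unvis (vset st.2 i) ≤ F := by
        have h1 := unvis_le_length (vset st.2 i)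
        have h2 := length_vset st.2 i
        omega
      have key : dfsA edges (F + 1) i st = runB edges [(i, nbrs edges i)] st.1 (vset st.2 i) := by
        rw [sim1 edges (unvis (vset st.2 i)) (vset st.2 i) rfl (nbrs edges i) i [] st.1 F hun]
        rw [dfsA_succ]
        simp only [runB]
      rw [key]
      apply ih
      rw [← key]
      have := (length_dfsA edges (F + 1)).1 i st
      omega

lemma loop2 (edges : List (List Int)) (F : Nat) :
    ∀ (l : List Int) (c : Int) (v : List Bool), v.length ≤ F →
      pass2A edges (F + 1) l c v =
      (l.foldl (fun (cv : Int × List Bool) ele =>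
        if vget cv.2 ele then cv
        else (cv.1 + 1, run2B edges [nbrs edges ele] (vset cv.2 ele))) (c, v)).1 := by
  intro l
  induction l with
  | nil => intro c v hl; rfl
  | cons e rest ih =>
    intro c v hl
    simp only [List.foldl_cons, pass2A]
    by_cases hve : vget v e = true
    · rw [if_pos hve, if_pos hve]
      exact ih c v hl
    · rw [if_neg hve, if_neg hve]
      have hun : unvis (vset v e) ≤ F := by
        have h1 := unvis_le_length (vset v e)
        have h2 := length_vset v e
        omega
      have key : dfs2A edges (F + 1) e v = run2B edges [nbrs edges e] (vset v e) := by
        rw [sim2 edges (unvis (vset v e)) (vset v e) rfl (nbrs edges e) [] F hun]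
        rw [dfs2A_succ]
        simp only [run2B]
      rw [key]
      apply ih
      rw [← key]
      have := (length_dfs2A edges (F + 1)).1 e v
      omega

-- ===== VERDICT (by name: the statement is the Claim_ definition above) =====
theorem minNumOfDominos_spec : Claim_equal_minNumOfDominos := by
  intro edges V _ _
  unfold Spec_minNumOfDominos minNumOfDominos minNumOfDominos_alt
  rw [loop1 edges V.toNat _ _ (by simp), loop2 edges V.toNat _ _ _ (by simp)]
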